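-- pv_equiv track=rewrite | github.com/harald-lang/DBnormalizer | DBnormalizer.py | removeRedundantSchemas
-- ===== SOURCE A (Python) =====
-- def removeRedundantSchemas(relations):
-- 	removeIndexes = set()
--
-- 	for i in range(len(relations)):
-- 		for j in range(len(relations)):
-- 			if (i > j) and (relations[i] <= relations[j]):
-- 				removeIndexes.add(i)
-- 	newRelations = []
-- 	for i in range(len(relations)):
-- 		if i not in removeIndexes:
-- 			newRelations.append(relations[i])
-- 	return newRelations
-- ===== SOURCE B (Python) =====
-- def removeRedundantSchemas(relations):
--     kept = []
--     for r in relations: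
--         if not any(r <= k for k in kept):
--             kept.append(r)
--     return kept
-- ===== Notes on version B (the rewrite author's own statement) =====
-- stated objective: simpler
-- what changed: Single forward pass keeping a list of retained relations and subset-testing each new relation only against those (valid by transitivity of <=), instead of a double index loop over all pairs collecting a set of remove-indexes plus a second rebuild pass.
import Mathlib
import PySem

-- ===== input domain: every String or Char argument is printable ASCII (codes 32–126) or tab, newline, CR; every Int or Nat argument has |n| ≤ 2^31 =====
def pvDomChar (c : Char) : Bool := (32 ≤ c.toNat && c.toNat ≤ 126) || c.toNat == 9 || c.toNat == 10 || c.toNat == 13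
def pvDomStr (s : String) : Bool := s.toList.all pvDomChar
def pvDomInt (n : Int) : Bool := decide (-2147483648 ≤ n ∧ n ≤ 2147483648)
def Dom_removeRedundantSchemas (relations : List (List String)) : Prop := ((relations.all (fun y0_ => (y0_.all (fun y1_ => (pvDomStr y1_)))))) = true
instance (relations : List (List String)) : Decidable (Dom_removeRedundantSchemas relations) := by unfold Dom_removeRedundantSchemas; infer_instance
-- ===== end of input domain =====

-- B is a simpler single forward pass keeping only the retained relations and comparing each new
-- relation against those (correct by transitivity of the subset test `<=`), instead of A's index
-- double-loop collecting remove-indexes in a set plus a rebuild pass.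

-- Python's `s <= t` on sets: subset test (PySem.Set.issubset).
def lePy (a b : List String) : Bool := PySem.Set.issubset a b

-- ===== PORT A =====
def removeRedundantSchemas (relations : List (List String)) : List (List String) :=
  let n := relations.length
  let removeIndexes : PySem.Set Nat :=
    (List.range n).foldl (fun s i =>
      (List.range n).foldl (fun s j =>
        if i > j && lePy (relations.getD i []) (relations.getD j []) then PySem.Set.add s i else s) s)
      PySem.Set.empty
  (List.range n).foldl (fun acc i =>
    if !(PySem.Set.contains removeIndexes i) then acc ++ [relations.getD i []] else acc) []

-- ===== PORT B =====
def removeRedundantSchemas_alt (relations : List (List String)) : List (List String) :=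
  relations.foldl (fun kept r => if kept.any (fun k => lePy r k) then kept else kept ++ [r]) []

-- ===== PRECONDITION & SPEC =====
def Spec_removeRedundantSchemas (relations : List (List String)) (out : List (List String)) : Prop := out = removeRedundantSchemas_alt relations
instance (relations : List (List String)) (out : List (List String)) : Decidable (Spec_removeRedundantSchemas relations out) := by unfold Spec_removeRedundantSchemas; infer_instance

-- ===== CLAIM (what is proved, stated in full; the proofs are below) =====
def Claim_equal_removeRedundantSchemas : Prop := ∀ (relations : List (List String)), Dom_removeRedundantSchemas relations → Spec_removeRedundantSchemas relations (removeRedundantSchemas relations)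

-- ===== LEMMAS AND PROOFS =====

theorem lePy_refl (a : List String) : lePy a a = true := by
  rw [lePy, PySem.Set.issubset_iff]
  exact fun x hx => hx

theorem lePy_trans {a b c : List String} (hab : lePy a b = true) (hbc : lePy b c = true) :
    lePy a c = true := by
  rw [lePy, PySem.Set.issubset_iff] at hab hbc ⊢
  exact fun x hx => hbc x (hab x hx)

-- reference recursion: keep x iff no element of the full prefix `prev` dominates it
def keepPref (prev : List (List String)) : List (List String) → List (List String)
  | [] => []
  | x :: xs =>
    if prev.any (fun p => lePy x p) then keepPref (prev ++ [x]) xs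
    else x :: keepPref (prev ++ [x]) xs

-- invariant linking the full prefix and B's kept list
def KInv (prev kept : List (List String)) : Prop :=
  (∀ k ∈ kept, k ∈ prev) ∧ (∀ p ∈ prev, ∃ k ∈ kept, lePy p k = true)

theorem any_eq_of_inv {prev kept : List (List String)} (h : KInv prev kept) (x : List String) :
    kept.any (fun k => lePy x k) = prev.any (fun p => lePy x p) := by
  rcases h with ⟨hsub, hdom⟩
  rw [Bool.eq_iff_iff]
  simp only [List.any_eq_true]
  constructor
  · rintro ⟨k, hk, hle⟩
    exact ⟨k, hsub k hk, hle⟩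
  · rintro ⟨p, hp, hle⟩
    obtain ⟨k, hk, hpk⟩ := hdom p hp
    exact ⟨k, hk, lePy_trans hle hpk⟩

theorem B_fold_eq (xs : List (List String)) :
    ∀ prev kept, KInv prev kept →
      xs.foldl (fun kept r => if kept.any (fun k => lePy r k) then kept else kept ++ [r]) kept
        = kept ++ keepPref prev xs := by
  induction xs with
  | nil => intro prev kept _; simp [keepPref]
  | cons x xs ih =>
    intro prev kept h
    simp only [List.foldl_cons, keepPref]
    rw [any_eq_of_inv h x]
    by_cases hp : prev.any (fun p => lePy x p) = true
    · rw [if_pos hp, if_pos hp]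
      apply ih (prev ++ [x]) kept
      refine ⟨fun k hk => List.mem_append_left _ (h.1 k hk), fun p hpm => ?_⟩
      rcases List.mem_append.mp hpm with hpm | hpm
      · exact h.2 p hpm
      · rcases List.mem_singleton.mp hpm with rfl
        obtain ⟨q, hq, hxq⟩ := List.any_eq_true.mp hp
        obtain ⟨k, hk, hqk⟩ := h.2 q hq
        exact ⟨k, hk, lePy_trans hxq hqk⟩
    · rw [if_neg hp, if_neg hp]
      have hinv : KInv (prev ++ [x]) (kept ++ [x]) := by
        constructor
        · intro k hk
          rcases List.mem_append.mp hk with hk | hk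
          · exact List.mem_append_left _ (h.1 k hk)
          · exact List.mem_append_right _ hk
        · intro p hpm
          rcases List.mem_append.mp hpm with hpm | hpm
          · obtain ⟨k, hk, hpk⟩ := h.2 p hpm
            exact ⟨k, List.mem_append_left _ hk, hpk⟩
          · rcases List.mem_singleton.mp hpm with rfl
            exact ⟨p, List.mem_append_right _ (List.mem_singleton.mpr rfl), lePy_refl p⟩
      rw [ih (prev ++ [x]) (kept ++ [x]) hinv]
      simp

theorem inner_mem (R : List (List String)) (i : Nat) (L : List Nat) (s : PySem.Set Nat) (x : Nat) :
    x ∈ L.foldl (fun s j => if i > j && lePy (R.getD i []) (R.getD j []) then PySem.Set.add s i else s) s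
      ↔ x ∈ s ∨ (x = i ∧ ∃ j ∈ L, j < i ∧ lePy (R.getD i []) (R.getD j []) = true) := by
  induction L generalizing s with
  | nil => simp
  | cons j js ih =>
    simp only [List.foldl_cons, ih, List.mem_cons]
    by_cases h : (decide (i > j) && lePy (R.getD i []) (R.getD j [])) = true
    · rw [if_pos h]
      rw [Bool.and_eq_true, decide_eq_true_eq] at h
      rw [PySem.Set.mem_add]
      constructor
      · rintro ((hx | rfl) | ⟨rfl, j', hj', hji, hle⟩)
        · exact Or.inl hx
        · exact Or.inr ⟨rfl, j, Or.inl rfl, h.1, h.2⟩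
        · exact Or.inr ⟨rfl, j', Or.inr hj', hji, hle⟩
      · rintro (hx | ⟨rfl, _, _, _, _⟩)
        · exact Or.inl (Or.inl hx)
        · exact Or.inl (Or.inr rfl)
    · rw [if_neg h]
      have h' : ¬(i > j ∧ lePy (R.getD i []) (R.getD j []) = true) := by
        simpa [Bool.and_eq_true, decide_eq_true_eq] using h
      constructor
      · rintro (hx | ⟨rfl, j', hj', hji, hle⟩)
        · exact Or.inl hx
        · exact Or.inr ⟨rfl, j', Or.inr hj', hji, hle⟩
      · rintro (hx | ⟨rfl, j', hj', hji, hle⟩)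
        · exact Or.inl hx
        · rcases hj' with rfl | hj'
          · exact absurd ⟨hji, hle⟩ h'
          · exact Or.inr ⟨rfl, j', hj', hji, hle⟩

theorem outer_mem (R : List (List String)) (n : Nat) (L : List Nat) (s : PySem.Set Nat) (x : Nat) :
    x ∈ L.foldl (fun s i => (List.range n).foldl
        (fun s j => if i > j && lePy (R.getD i []) (R.getD j []) then PySem.Set.add s i else s) s) s
      ↔ x ∈ s ∨ (x ∈ L ∧ ∃ j, j < x ∧ j < n ∧ lePy (R.getD x []) (R.getD j []) = true) := by
  induction L generalizing s with
  | nil => simp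
  | cons i is ih =>
    simp only [List.foldl_cons, ih, inner_mem, List.mem_cons]
    constructor
    · rintro ((hx | ⟨rfl, j, hj, hji, hle⟩) | ⟨hxL, hrest⟩)
      · exact Or.inl hx
      · exact Or.inr ⟨Or.inl rfl, j, hji, List.mem_range.mp hj, hle⟩
      · exact Or.inr ⟨Or.inr hxL, hrest⟩
    · rintro (hx | ⟨hxL, j, hji, hjn, hle⟩)
      · exact Or.inl (Or.inl hx)
      · rcases hxL with rfl | hxL
        · exact Or.inl (Or.inr ⟨rfl, j, List.mem_range.mpr hjn, hji, hle⟩)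
        · exact Or.inr ⟨hxL, j, hji, hjn, hle⟩

theorem getD_append_length (prev xs : List (List String)) (x : List String) :
    (prev ++ x :: xs).getD prev.length [] = x := by
  simp [List.getD_eq_getElem?_getD]

theorem getD_append_lt (prev rest : List (List String)) (j : Nat) (hj : j < prev.length) :
    (prev ++ rest).getD j [] = prev.getD j [] := by
  rw [List.getD_append _ _ _ _ hj]

theorem keepPref_eq (ys : List (List String)) :
    ∀ prev : List (List String),
      ((List.range' prev.length ys.length).filter
          (fun i => !(decide (∃ j, j < i ∧ lePy ((prev ++ ys).getD i []) ((prev ++ ys).getD j []) = true)))).map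
        (fun i => (prev ++ ys).getD i [])
        = keepPref prev ys := by
  induction ys with
  | nil => intro prev; simp [keepPref]
  | cons x xs ih =>
    intro prev
    have hget : (prev ++ x :: xs).getD prev.length [] = x := getD_append_length prev xs x
    have hcond : (∃ j, j < prev.length ∧ lePy ((prev ++ x :: xs).getD prev.length []) ((prev ++ x :: xs).getD j []) = true)
        ↔ prev.any (fun p => lePy x p) = true := by
      rw [hget]
      simp only [List.any_eq_true]
      constructor
      · rintro ⟨j, hj, hle⟩
        rw [getD_append_lt prev _ j hj, List.getD_eq_getElem prev _ hj] at hle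
        exact ⟨prev[j], List.getElem_mem hj, hle⟩
      · rintro ⟨p, hp, hle⟩
        obtain ⟨j, hj, rfl⟩ := List.mem_iff_getElem.mp hp
        refine ⟨j, hj, ?_⟩
        rw [getD_append_lt prev _ j hj, List.getD_eq_getElem prev _ hj]
        exact hle
    have hIH := ih (prev ++ [x])
    rw [List.length_append, List.length_cons, List.length_nil, List.append_assoc,
      List.singleton_append, Nat.zero_add] at hIH
    simp only [List.length_cons, List.range'_succ, List.filter_cons, keepPref]
    by_cases hp : prev.any (fun p => lePy x p) = true
    · have hP := hcond.mpr hp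
      rw [if_neg (by simp only [Bool.not_eq_true', decide_eq_false_iff_not, not_not]; exact hP),
        if_pos hp]
      exact hIH
    · have hP : ¬∃ j, j < prev.length ∧ lePy ((prev ++ x :: xs).getD prev.length []) ((prev ++ x :: xs).getD j []) = true :=
        fun hc => hp (hcond.mp hc)
      rw [if_pos (by simp only [Bool.not_eq_true', decide_eq_false_iff_not]; exact hP), if_neg hp]
      simp only [List.map_cons, hget]
      rw [hIH]

theorem A_eq_keepPref (relations : List (List String)) :
    removeRedundantSchemas relations = keepPref [] relations := by
  unfold removeRedundantSchemas
  rw [PySem.List.foldl_append_if]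
  rw [List.nil_append]
  have hfil : (List.range relations.length).filter
        (fun i => !(PySem.Set.contains ((List.range relations.length).foldl (fun s i =>
          (List.range relations.length).foldl
            (fun s j => if i > j && lePy (relations.getD i []) (relations.getD j []) then PySem.Set.add s i else s) s)
          PySem.Set.empty) i))
      = (List.range relations.length).filter
        (fun i => !(decide (∃ j, j < i ∧ lePy (relations.getD i []) (relations.getD j []) = true))) := by
    apply List.filter_congr
    intro i hi
    have hin : i < relations.length := List.mem_range.mp hi
    congr 1
    rw [Bool.eq_iff_iff, PySem.Set.contains_iff _ _, outer_mem, decide_eq_true_eq]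
    constructor
    · rintro (hx | ⟨_, j, hji, _, hle⟩)
      · simp [PySem.Set.empty] at hx
      · exact ⟨j, hji, hle⟩
    · rintro ⟨j, hji, hle⟩
      exact Or.inr ⟨hi, j, hji, lt_trans hji hin, hle⟩
  rw [hfil]
  have := keepPref_eq relations []
  simpa [List.range_eq_range'] using this

-- ===== VERDICT (by name: the statement is the Claim_ definition above) =====
theorem removeRedundantSchemas_spec : Claim_equal_removeRedundantSchemas := by
  intro relations _
  unfold Spec_removeRedundantSchemas removeRedundantSchemas_alt
  rw [A_eq_keepPref]
  rw [B_fold_eq relations [] [] ⟨by intro k hk; exact absurd hk (List.not_mem_nil), by intro p hp; exact absurd hp (List.not_mem_nil)⟩]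
  simp
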